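-- pv_equiv track=rewrite | github.com/colverz/Geant4-Agent | ui/web/server.py | _select_phase_fields
-- ===== SOURCE A (Python) =====
-- from typing import Any, Dict, List, Optional, Tuple
--
-- PHASE_ORDER = [
--     ("geometry_core", ("geometry.structure",)),
--     ("geometry_params", ("geometry.params.",)),
--     ("materials", ("materials.",)),
--     ("source_core", ("source.particle", "source.type")),
--     ("source_kinematics", ("source.energy_MeV", "source.position", "source.direction")),
--     ("physics", ("physics_list.",)),
--     ("output", ("output.",)),
-- ]
--
-- def _select_phase_fields(missing_fields: List[str]) -> Tuple[str, List[str]]: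
--     for phase, patterns in PHASE_ORDER:
--         selected = []
--         for item in missing_fields:
--             for p in patterns:
--                 if p.endswith("."):
--                     if item.startswith(p):
--                         selected.append(item)
--                         break
--                 else:
--                     if item == p:
--                         selected.append(item)
--                         break
--         if selected:
--             return phase, selected
--     return "complete", []
-- ===== SOURCE B (Python) =====
-- from typing import List, Tuple
--
-- PHASE_ORDER = [
--     ("geometry_core", ("geometry.structure",)),
--     ("geometry_params", ("geometry.params.",)),
--     ("materials", ("materials.",)),
--     ("source_core", ("source.particle", "source.type")),
--     ("source_kinematics", ("source.energy_MeV", "source.position", "source.direction")),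
--     ("physics", ("physics_list.",)),
--     ("output", ("output.",)),
-- ]
--
-- def _classify(item):
--     """Index and name of the first phase whose patterns match item, or None."""
--     for i, (phase, patterns) in enumerate(PHASE_ORDER):
--         if any(item.startswith(p) if p.endswith(".") else item == p for p in patterns):
--             return i, phase
--     return None
--
-- def _select_phase_fields(missing_fields: List[str]) -> Tuple[str, List[str]]:
--     best = None
--     bucket = []
--     for item in missing_fields:
--         c = _classify(item)
--         if c is None:
--             continue
--         if best is None or c[0] < best[0]:
--             best, bucket = c, [item]
--         elif c[0] == best[0]:
--             bucket.append(item)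
--     if best is None:
--         return "complete", []
--     return best[1], bucket
-- ===== Notes on version B (the rewrite author's own statement) =====
-- stated objective: alternative
-- what changed: Instead of A's per-phase rescans of the whole field list (up to 7 filtering passes, first nonempty wins), B classifies each field once into (phase index, name) and keeps a running argmin with its bucket in a single pass over the fields.
import Mathlib
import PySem

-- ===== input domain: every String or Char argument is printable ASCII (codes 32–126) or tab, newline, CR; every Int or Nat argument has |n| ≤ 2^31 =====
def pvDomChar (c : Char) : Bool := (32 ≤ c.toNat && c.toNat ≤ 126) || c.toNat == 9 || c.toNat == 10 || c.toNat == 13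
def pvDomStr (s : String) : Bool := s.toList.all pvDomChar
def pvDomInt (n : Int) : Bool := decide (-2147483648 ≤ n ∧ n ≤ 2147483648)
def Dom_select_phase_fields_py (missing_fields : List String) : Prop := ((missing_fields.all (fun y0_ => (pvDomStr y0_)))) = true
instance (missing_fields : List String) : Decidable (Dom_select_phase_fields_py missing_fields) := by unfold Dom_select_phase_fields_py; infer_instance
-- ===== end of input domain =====

-- B replaces A's per-phase rescans of the field list by a single pass that classifies each
-- field once into (phase index, name) and keeps a running argmin with its bucket (alternative
-- decomposition, same cost class).


-- module constant PHASE_ORDER (shared by both Python files)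
def pvPhaseOrder : List (String × List String) :=
  [("geometry_core", ["geometry.structure"]),
   ("geometry_params", ["geometry.params."]),
   ("materials", ["materials."]),
   ("source_core", ["source.particle", "source.type"]),
   ("source_kinematics", ["source.energy_MeV", "source.position", "source.direction"]),
   ("physics", ["physics_list."]),
   ("output", ["output."])]

-- ===== PORT A =====
-- inner 'for p in patterns: … append; break' loop of A
def pvAInner (pats : List String) (item : String) (sel : List String) : List String :=
  match pats with
  | [] => sel
  | p :: rest =>
    if PySem.Str.endswith p "." then
      if PySem.Str.startswith item p then sel ++ [item] else pvAInner rest item sel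
    else
      if item == p then sel ++ [item] else pvAInner rest item sel

-- outer 'for phase, patterns in PHASE_ORDER' loop of A
def pvALoop (phases : List (String × List String)) (missing : List String) : String × List String :=
  match phases with
  | [] => ("complete", [])
  | (phase, pats) :: rest =>
    let selected := missing.foldl (fun sel item => pvAInner pats item sel) []
    if selected.isEmpty then pvALoop rest missing else (phase, selected)

def select_phase_fields_py (missing_fields : List String) : String × List String :=
  pvALoop pvPhaseOrder missing_fields

-- ===== PORT B =====
-- the genexp condition inside _classify's any(…)
def pvBMatch (item p : String) : Bool :=
  if PySem.Str.endswith p "." then PySem.Str.startswith item p else item == p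

-- _classify: first phase (index, name) whose patterns match item
def pvBClassify (item : String) : List (String × List String) → Nat → Option (Nat × String)
  | [], _ => none
  | (phase, pats) :: rest, i =>
    if pats.any (fun p => pvBMatch item p) then some (i, phase) else pvBClassify item rest (i + 1)

-- body of B's single loop: running argmin (best, bucket)
def pvBStep (st : Option (Nat × String) × List String) (item : String) :
    Option (Nat × String) × List String :=
  match pvBClassify item pvPhaseOrder 0 with
  | none => st
  | some c =>
    match st.1 with
    | none => (some c, [item])
    | some b =>
      if c.1 < b.1 then (some c, [item])
      else if c.1 = b.1 then (some b, st.2 ++ [item])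
      else st

def select_phase_fields_py_alt (missing_fields : List String) : String × List String :=
  match missing_fields.foldl pvBStep (none, []) with
  | (none, _) => ("complete", [])
  | (some b, bucket) => (b.2, bucket)

-- ===== PRECONDITION & SPEC =====
def Spec_select_phase_fields_py (missing_fields : List String) (out : String × List String) : Prop := out = select_phase_fields_py_alt missing_fields
instance (missing_fields : List String) (out : String × List String) : Decidable (Spec_select_phase_fields_py missing_fields out) := by unfold Spec_select_phase_fields_py; infer_instance

-- ===== CLAIM (what is proved, stated in full; the proofs are below) =====
def Claim_equal_select_phase_fields_py : Prop := ∀ (missing_fields : List String), Dom_select_phase_fields_py missing_fields → Spec_select_phase_fields_py missing_fields (select_phase_fields_py missing_fields)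

-- ===== LEMMAS AND PROOFS =====

-- generic B-loop machinery, parametrized by the classify function
def pvGStep (c : String → Option (Nat × String)) (st : Option (Nat × String) × List String)
    (item : String) : Option (Nat × String) × List String :=
  match c item with
  | none => st
  | some p =>
    match st.1 with
    | none => (some p, [item])
    | some b =>
      if p.1 < b.1 then (some p, [item])
      else if p.1 = b.1 then (some b, st.2 ++ [item])
      else st

def pvOut : Option (Nat × String) × List String → String × List String
  | (none, _) => ("complete", [])
  | (some b, bucket) => (b.2, bucket)

lemma pvBStep_eq_gStep : pvBStep = pvGStep (fun it => pvBClassify it pvPhaseOrder 0) := rfl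

-- A's inner break-loop is 'append iff some pattern matches'
lemma pvAInner_eq (pats : List String) (item : String) (sel : List String) :
    pvAInner pats item sel = if pats.any (fun p => pvBMatch item p) then sel ++ [item] else sel := by
  induction pats with
  | nil => simp [pvAInner]
  | cons p rest ih =>
    have hhead : pvAInner (p :: rest) item sel
        = if pvBMatch item p = true then sel ++ [item] else pvAInner rest item sel := by
      simp only [pvAInner, pvBMatch]
      split_ifs <;> rfl
    rw [hhead, ih, List.any_cons]
    cases hb : pvBMatch item p
    · simp
    · simp

-- A's selected list is a filter
lemma pvASelected (pats : List String) (missing : List String) :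
    missing.foldl (fun sel item => pvAInner pats item sel) [] =
      missing.filter (fun item => pats.any (fun p => pvBMatch item p)) := by
  have : (fun sel item => pvAInner pats item sel) =
      (fun sel item => if pats.any (fun p => pvBMatch item p) then sel ++ [item] else sel) := by
    funext sel item; exact pvAInner_eq pats item sel
  rw [this, PySem.List.foldl_append_if_eq_filter]
  simp

-- classify with base index i+1 is the shifted classify with base i
lemma pvBClassify_shift (item : String) (L : List (String × List String)) (i : Nat) :
    pvBClassify item L (i + 1) = (pvBClassify item L i).map (fun b => (b.1 + 1, b.2)) := by
  induction L generalizing i with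
  | nil => simp [pvBClassify]
  | cons hd tl ih =>
    obtain ⟨ph, pats⟩ := hd
    simp only [pvBClassify]
    split_ifs with h
    · rfl
    · exact ih (i + 1)

-- once the state holds index-0 best, the rest of the fold just filters
lemma pvFold_zero_state (c : String → Option (Nat × String)) (nm : String)
    (Q : String → Bool)
    (hQ : ∀ it, Q it = true → c it = some (0, nm))
    (hN : ∀ it, Q it = false → ∀ b, c it = some b → 0 < b.1) :
    ∀ (xs : List String) (buf : List String),
      xs.foldl (pvGStep c) (some (0, nm), buf) = (some (0, nm), buf ++ xs.filter Q) := by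
  intro xs
  induction xs with
  | nil => simp
  | cons x xs ih =>
    intro buf
    by_cases hx : Q x = true
    · have hc := hQ x hx
      have step : pvGStep c (some (0, nm), buf) x = (some (0, nm), buf ++ [x]) := by
        simp [pvGStep, hc]
      simp only [List.foldl_cons, step, ih (buf ++ [x])]
      simp [hx]
    · have hx' : Q x = false := by simpa using hx
      have step : pvGStep c (some (0, nm), buf) x = (some (0, nm), buf) := by
        simp only [pvGStep]
        cases hcx : c x with
        | none => rfl
        | some b =>
          have hb := hN x hx' b hcx
          simp only []
          rw [if_neg (by omega), if_neg (by omega)]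
      simp only [List.foldl_cons, step, ih buf]
      simp [hx']

-- if some field matches phase 0, the fold lands on (0, nm) with the filtered bucket
lemma pvFold_zero (c : String → Option (Nat × String)) (nm : String) (Q : String → Bool)
    (hQ : ∀ it, Q it = true → c it = some (0, nm))
    (hN : ∀ it, Q it = false → ∀ b, c it = some b → 0 < b.1) :
    ∀ (xs : List String) (st : Option (Nat × String) × List String),
      (st = (none, []) ∨ ∃ b, st.1 = some b ∧ 0 < b.1) →
      (∃ it ∈ xs, Q it = true) →
      xs.foldl (pvGStep c) st = (some (0, nm), xs.filter Q) := by
  intro xs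
  induction xs with
  | nil => rintro st _ ⟨it, h, _⟩; simp at h
  | cons x xs ih =>
    rintro st hst hex
    by_cases hx : Q x = true
    · have hc := hQ x hx
      have step : pvGStep c st x = (some (0, nm), [x]) := by
        rcases hst with h | ⟨b, hb, hbpos⟩
        · subst h; simp [pvGStep, hc]
        · simp only [pvGStep, hc, hb]
          rw [if_pos hbpos]
      simp only [List.foldl_cons, step]
      rw [pvFold_zero_state c nm Q hQ hN xs [x]]
      simp [hx]
    · have hx' : Q x = false := by simpa using hx
      have hex' : ∃ it ∈ xs, Q it = true := by
        rcases hex with ⟨it, hmem, hit⟩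
        rcases List.mem_cons.mp hmem with rfl | h
        · exact absurd hit hx
        · exact ⟨it, h, hit⟩
      have hst' : pvGStep c st x = (none, []) ∨ ∃ b, (pvGStep c st x).1 = some b ∧ 0 < b.1 := by
        rcases hst with h | ⟨b, hb, hbpos⟩
        · subst h
          cases hcx : c x with
          | none => left; simp [pvGStep, hcx]
          | some p =>
            right
            have := hN x hx' p hcx
            exact ⟨p, by simp [pvGStep, hcx], this⟩
        · right
          cases hcx : c x with
          | none => exact ⟨b, by simp [pvGStep, hcx, hb], hbpos⟩
          | some p =>
            have hp := hN x hx' p hcx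
            simp only [pvGStep, hcx, hb]
            by_cases h1 : p.1 < b.1
            · exact ⟨p, by rw [if_pos h1], hp⟩
            · by_cases h2 : p.1 = b.1
              · exact ⟨b, by rw [if_neg h1, if_pos h2], hbpos⟩
              · exact ⟨b, by rw [if_neg h1, if_neg h2]; exact hb, hbpos⟩
      simp only [List.foldl_cons]
      rw [ih _ hst' hex']
      simp [hx']

-- the fold commutes with shifting every classify index by one
lemma pvFold_shift (c c' : String → Option (Nat × String)) :
    ∀ (xs : List String), (∀ it ∈ xs, c it = (c' it).map (fun b => (b.1 + 1, b.2))) →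
    ∀ (o : Option (Nat × String)) (buf : List String),
      xs.foldl (pvGStep c) (o.map (fun b => (b.1 + 1, b.2)), buf) =
        (fun st : Option (Nat × String) × List String =>
          (st.1.map (fun b => (b.1 + 1, b.2)), st.2)) (xs.foldl (pvGStep c') (o, buf)) := by
  intro xs
  induction xs with
  | nil => intro _ o buf; rfl
  | cons x xs ih =>
    intro hc o buf
    have hx := hc x (List.mem_cons_self ..)
    have hc' : ∀ it ∈ xs, c it = (c' it).map (fun b => (b.1 + 1, b.2)) :=
      fun it h => hc it (List.mem_cons_of_mem _ h)
    simp only [List.foldl_cons]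
    cases hcx : c' x with
    | none =>
      have : c x = none := by rw [hx, hcx]; rfl
      rw [show pvGStep c (o.map (fun b => (b.1+1, b.2)), buf) x = (o.map (fun b => (b.1+1, b.2)), buf) by
            simp [pvGStep, this],
          show pvGStep c' (o, buf) x = (o, buf) by simp [pvGStep, hcx]]
      exact ih hc' o buf
    | some p =>
      have hcxm : c x = some (p.1 + 1, p.2) := by rw [hx, hcx]; rfl
      cases o with
      | none =>
        rw [show pvGStep c ((none : Option (Nat × String)).map _, buf) x
              = (some (p.1 + 1, p.2), [x]) by simp [pvGStep, hcxm],
            show pvGStep c' ((none : Option (Nat × String)), buf) x = (some p, [x]) by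
              simp [pvGStep, hcx]]
        exact ih hc' (some p) [x]
      | some b =>
        by_cases h1 : p.1 < b.1
        · rw [show pvGStep c ((some b).map (fun b => (b.1+1, b.2)), buf) x
                = (some (p.1 + 1, p.2), [x]) by
              simp only [pvGStep, hcxm, Option.map_some]
              rw [if_pos (by omega)],
              show pvGStep c' (some b, buf) x = (some p, [x]) by
              simp only [pvGStep, hcx]
              rw [if_pos h1]]
          exact ih hc' (some p) [x]
        · by_cases h2 : p.1 = b.1
          · rw [show pvGStep c ((some b).map (fun b => (b.1+1, b.2)), buf) x
                  = ((some b).map (fun b => (b.1+1, b.2)), buf ++ [x]) by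
                simp only [pvGStep, hcxm, Option.map_some]
                rw [if_neg (by omega), if_pos (by omega)],
                show pvGStep c' (some b, buf) x = (some b, buf ++ [x]) by
                simp only [pvGStep, hcx]
                rw [if_neg h1, if_pos h2]]
            exact ih hc' (some b) (buf ++ [x])
          · rw [show pvGStep c ((some b).map (fun b => (b.1+1, b.2)), buf) x
                  = ((some b).map (fun b => (b.1+1, b.2)), buf) by
                simp only [pvGStep, hcxm, Option.map_some]
                rw [if_neg (by omega), if_neg (by omega)],
                show pvGStep c' (some b, buf) x = (some b, buf) by
                simp only [pvGStep, hcx]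
                rw [if_neg h1, if_neg h2]]
            exact ih hc' (some b) buf

-- if nothing classifies, the fold stays at the start state
lemma pvFold_none (c : String → Option (Nat × String)) :
    ∀ (xs : List String), (∀ it ∈ xs, c it = none) →
    ∀ st, xs.foldl (pvGStep c) st = st := by
  intro xs
  induction xs with
  | nil => intro _ st; rfl
  | cons x xs ih =>
    intro h st
    have hx : c x = none := h x (List.mem_cons_self ..)
    simp only [List.foldl_cons, pvGStep, hx]
    exact ih (fun it hm => h it (List.mem_cons_of_mem _ hm)) st

-- main bridge: A's phase loop equals the projection of B's generic fold
lemma pvMain (phases : List (String × List String)) (xs : List String) :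
    pvALoop phases xs = pvOut (xs.foldl (pvGStep (fun it => pvBClassify it phases 0)) (none, [])) := by
  induction phases generalizing xs with
  | nil =>
    rw [pvFold_none (fun it => pvBClassify it [] 0) xs (fun _ _ => rfl) (none, [])]
    rfl
  | cons hd rest ih =>
    obtain ⟨ph, pats⟩ := hd
    simp only [pvALoop]
    rw [pvASelected]
    set Q : String → Bool := fun item => pats.any (fun p => pvBMatch item p) with hQdef
    have hclass : ∀ it, pvBClassify it ((ph, pats) :: rest) 0 =
        if Q it then some (0, ph) else (pvBClassify it rest 0).map (fun b => (b.1 + 1, b.2)) := by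
      intro it
      simp only [pvBClassify, hQdef]
      split_ifs with h
      · rfl
      · exact pvBClassify_shift it rest 0
    by_cases hex : ∃ it ∈ xs, Q it = true
    · have hfil : xs.filter Q ≠ [] := by
        rcases hex with ⟨it, hm, hq⟩
        exact List.ne_nil_of_mem (List.mem_filter.mpr ⟨hm, hq⟩)
      rw [if_neg (fun h => hfil (List.isEmpty_iff.mp h))]
      rw [pvFold_zero (fun it => pvBClassify it ((ph, pats) :: rest) 0) ph Q
            (fun it hq => by
              show pvBClassify it ((ph, pats) :: rest) 0 = some (0, ph)
              rw [hclass it, if_pos hq])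
            (fun it hq b hb => by
              have hb' : pvBClassify it ((ph, pats) :: rest) 0 = some b := hb
              rw [hclass it, if_neg (by simp [hq])] at hb'
              rcases Option.map_eq_some_iff.mp hb' with ⟨b', _, rfl⟩
              omega)
            xs (none, []) (Or.inl rfl) hex]
      rfl
    · have hall : ∀ it ∈ xs, Q it = false := by
        intro it hm
        by_contra h
        exact hex ⟨it, hm, by simpa using h⟩
      have hfil : xs.filter Q = [] :=
        List.filter_eq_nil_iff.mpr (fun it hm => by simp [hall it hm])
      rw [if_pos (List.isEmpty_iff.mpr hfil)]
      rw [ih xs]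
      have hshift := pvFold_shift (fun it => pvBClassify it ((ph, pats) :: rest) 0)
        (fun it => pvBClassify it rest 0) xs
        (fun it hm => by
          show pvBClassify it ((ph, pats) :: rest) 0
              = (pvBClassify it rest 0).map (fun b => (b.1 + 1, b.2))
          rw [hclass it, if_neg (by simp [hall it hm])]) none []
      simp only [Option.map_none] at hshift
      rw [hshift]
      cases xs.foldl (pvGStep fun it => pvBClassify it rest 0) (none, []) with
      | mk o buf => cases o <;> rfl

-- ===== VERDICT (by name: the statement is the Claim_ definition above) =====
theorem select_phase_fields_py_spec : Claim_equal_select_phase_fields_py := by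
  intro missing_fields _
  unfold Spec_select_phase_fields_py select_phase_fields_py select_phase_fields_py_alt
  rw [pvMain pvPhaseOrder missing_fields, pvBStep_eq_gStep]
  cases missing_fields.foldl (pvGStep fun it => pvBClassify it pvPhaseOrder 0) (none, []) with
  | mk o buf => cases o <;> rfl
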